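-- pv_equiv track=rewrite | github.com/masathayde/TR12024_Trabalho | Enlace/correcao.py | ham_parity
-- ===== SOURCE A (Python) =====
-- def ham_parity(bit_stream,interval):
--     count = interval - 1
--     valid = -1   # Se deve ou contar o bit atual
--     parity = 0
--     for i in range(len(bit_stream)):
--         if count == 0:
--             count = interval
--             valid = - valid
--         if valid > 0:
--             parity = parity ^ bit_stream[i]
--         count = count - 1
--     return parity
-- ===== SOURCE B (Python) =====
-- def ham_parity(bit_stream, interval):
--     if interval <= 0:
--         return 0
--     parity = 0
--     rest = bit_stream[interval - 1:]
--     while rest: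
--         for b in rest[:interval]:
--             parity ^= b
--         rest = rest[2 * interval:]
--     return parity
-- ===== Notes on version B (the rewrite author's own statement) =====
-- stated objective: simpler
-- what changed: Replaces A's per-bit count/valid state machine with direct slice-based chunking: skip the first interval-1 bits, then alternately XOR-fold a slice of interval bits and skip the next interval bits, with an explicit guard returning 0 for interval <= 0 (where A's counter never fires).
import Mathlib
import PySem

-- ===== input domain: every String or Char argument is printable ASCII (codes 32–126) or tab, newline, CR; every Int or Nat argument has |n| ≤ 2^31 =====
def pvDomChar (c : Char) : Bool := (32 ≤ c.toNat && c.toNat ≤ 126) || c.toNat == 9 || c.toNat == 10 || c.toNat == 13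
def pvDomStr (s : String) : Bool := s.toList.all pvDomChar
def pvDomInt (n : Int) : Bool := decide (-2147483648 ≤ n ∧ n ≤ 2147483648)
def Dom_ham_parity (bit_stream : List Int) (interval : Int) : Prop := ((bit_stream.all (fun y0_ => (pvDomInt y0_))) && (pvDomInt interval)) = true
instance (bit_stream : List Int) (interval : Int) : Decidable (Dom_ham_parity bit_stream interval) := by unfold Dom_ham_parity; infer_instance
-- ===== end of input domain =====

-- B replaces A's per-bit count/valid state machine by slice-based chunking (skip interval-1, XOR interval, skip interval, …); objective: simpler.

-- ===== PORT A =====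
-- one iteration of A's loop body on the state (count, valid, parity)
def hamStepA (interval : Int) (s : Int × Int × Int) (b : Int) : Int × Int × Int :=
  let count := s.1
  let valid := s.2.1
  let parity := s.2.2
  let count2 := if count = 0 then interval else count
  let valid2 := if count = 0 then -valid else valid
  let parity2 := if valid2 > 0 then PySem.Int.bxor parity b else parity
  (count2 - 1, valid2, parity2)

-- A's 'for i in range(len(bit_stream))' reads bit_stream[i] for each in-range i,
-- i.e. it folds the loop body over the elements of bit_stream in order.
def ham_parity (bit_stream : List Int) (interval : Int) : Int :=
  (bit_stream.foldl (hamStepA interval) (interval - 1, -1, 0)).2.2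

-- ===== PORT B =====
-- B's while loop; k encodes interval - 1 (B only enters the loop for interval ≥ 1).
-- The Python slices rest[:interval] and rest[2*interval:] have nonnegative bounds,
-- where slice = take / drop exactly (PySem.List.slice_to_natCast / slice_from_natCast).
def hamGoB (k : Nat) (rest : List Int) (parity : Int) : Int :=
  match rest with
  | [] => parity
  | b :: t =>
      hamGoB k ((b :: t).drop (2 * (k + 1)))
        (List.foldl PySem.Int.bxor parity ((b :: t).take (k + 1)))
termination_by rest.length
decreasing_by simp; omega

def ham_parity_alt (bit_stream : List Int) (interval : Int) : Int :=
  if interval ≤ 0 then 0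
  else hamGoB (interval.toNat - 1) (bit_stream.drop (interval.toNat - 1)) 0

-- ===== PRECONDITION & SPEC =====
def Spec_ham_parity (bit_stream : List Int) (interval : Int) (out : Int) : Prop := out = ham_parity_alt bit_stream interval
instance (bit_stream : List Int) (interval : Int) (out : Int) : Decidable (Spec_ham_parity bit_stream interval out) := by unfold Spec_ham_parity; infer_instance

-- ===== CLAIM (what is proved, stated in full; the proofs are below) =====
def Claim_equal_ham_parity : Prop := ∀ (bit_stream : List Int) (interval : Int), Dom_ham_parity bit_stream interval → Spec_ham_parity bit_stream interval (ham_parity bit_stream interval)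

-- ===== LEMMAS AND PROOFS =====

-- with a negative count A's loop never reaches count == 0, valid stays -1, parity never changes
theorem hamA_neg (k : Int) : ∀ (l : List Int) (c p : Int), c < 0 →
    (l.foldl (hamStepA k) (c, -1, p)).2.2 = p := by
  intro l
  induction l with
  | nil => intro c p _; rfl
  | cons b t ih =>
      intro c p hc
      have hne : ¬ c = 0 := by omega
      simp only [List.foldl_cons, hamStepA, hne, if_false]
      norm_num
      exact ih (c - 1) p (by omega)

-- skip phase: with valid = -1 and count = c ≥ 0, A skips the next c elements
theorem hamA_skip (k : Int) : ∀ (c : Nat) (l : List Int) (p : Int),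
    (l.foldl (hamStepA k) ((c : Int), -1, p)).2.2 =
    ((l.drop c).foldl (hamStepA k) (0, -1, p)).2.2 := by
  intro c
  induction c with
  | zero => intro l p; simp
  | succ c ih =>
      intro l p
      cases l with
      | nil => rfl
      | cons b t =>
          have hne : ¬ ((c : Int) + 1 = 0) := by omega
          simp only [List.foldl_cons, hamStepA, Nat.cast_succ, hne, if_false]
          norm_num
          simpa using ih t p

-- xor phase: with valid = 1 and count = c ≥ 0, A xors the next c elements
theorem hamA_xor (k : Int) : ∀ (c : Nat) (l : List Int) (p : Int),
    (l.foldl (hamStepA k) ((c : Int), 1, p)).2.2 =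
    ((l.drop c).foldl (hamStepA k) (0, 1, (l.take c).foldl PySem.Int.bxor p)).2.2 := by
  intro c
  induction c with
  | zero => intro l p; simp
  | succ c ih =>
      intro l p
      cases l with
      | nil => rfl
      | cons b t =>
          have hne : ¬ ((c : Int) + 1 = 0) := by omega
          simp only [List.foldl_cons, hamStepA, Nat.cast_succ, hne, if_false]
          norm_num
          simpa using ih t (PySem.Int.bxor p b)

-- main invariant: from the state (0, -1, p) A's loop computes exactly B's chunked loop
theorem hamA_main (k : Nat) : ∀ (n : Nat) (l : List Int), l.length ≤ n → ∀ (p : Int),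
    (l.foldl (hamStepA ((k : Int) + 1)) (0, -1, p)).2.2 = hamGoB k l p := by
  intro n
  induction n with
  | zero =>
      intro l hl p
      have : l = [] := by cases l with | nil => rfl | cons b t => simp at hl
      subst this; rw [hamGoB]; rfl
  | succ n ih =>
      intro l hl p
      cases l with
      | nil => rw [hamGoB]; rfl
      | cons b t =>
          -- first step: count = 0, flip to valid = 1, count := k+1, xor b
          have h1 : ((b :: t).foldl (hamStepA ((k : Int) + 1)) (0, -1, p)).2.2 =
              (t.foldl (hamStepA ((k : Int) + 1)) ((k : Int), 1, PySem.Int.bxor p b)).2.2 := by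
            simp only [List.foldl_cons, hamStepA]
            norm_num
          rw [h1, hamA_xor]
          have hacc : (t.take k).foldl PySem.Int.bxor (PySem.Int.bxor p b) =
              ((b :: t).take (k + 1)).foldl PySem.Int.bxor p := by
            simp
          cases hdrop : t.drop k with
          | nil =>
              -- the xor chunk reached the end of the list
              have ht : t.length ≤ k := by
                have h := congrArg List.length hdrop; simp at h; omega
              have hdrop2 : (b :: t).drop (2 * (k + 1)) = [] := by
                apply List.drop_eq_nil_of_le; simp; omega
              rw [hamGoB, hdrop2, hamGoB, hacc]
              rfl
          | cons c t2 =>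
              -- boundary step: count = 0, flip to valid = -1, skip c, then skip k more
              have h2 : ((c :: t2).foldl (hamStepA ((k : Int) + 1))
                    (0, 1, (t.take k).foldl PySem.Int.bxor (PySem.Int.bxor p b))).2.2 =
                  (t2.foldl (hamStepA ((k : Int) + 1))
                    ((k : Int), -1, (t.take k).foldl PySem.Int.bxor (PySem.Int.bxor p b))).2.2 := by
                simp only [List.foldl_cons, hamStepA]
                norm_num
              rw [h2, hamA_skip]
              have ht2 : t2.drop k = (b :: t).drop (2 * (k + 1)) := by
                have : t2 = t.drop (k + 1) := by
                  have := congrArg List.tail hdrop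
                  simpa [List.tail_drop] using this.symm
                subst this
                rw [List.drop_drop]
                rw [show 2*(k+1) = (k + (k+1)) + 1 from by omega, List.drop_succ_cons]
                rw [show k + 1 + k = k + (k + 1) from by omega]
              rw [ht2]
              have hlen : ((b :: t).drop (2 * (k + 1))).length ≤ n := by
                simp only [List.length_drop, List.length_cons] at hl ⊢
                omega
              rw [ih _ hlen]
              rw [hamGoB, hacc]

-- ===== VERDICT (by name: the statement is the Claim_ definition above) =====
theorem ham_parity_spec : Claim_equal_ham_parity := by
  intro bs interval _
  unfold Spec_ham_parity ham_parity ham_parity_alt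
  by_cases hk : interval ≤ 0
  · rw [if_pos hk]
    exact hamA_neg interval bs (interval - 1) 0 (by omega)
  · rw [if_neg hk]
    have hcast : interval - 1 = ((interval.toNat - 1 : Nat) : Int) := by omega
    have hcast2 : interval = (((interval.toNat - 1 : Nat) : Int)) + 1 := by omega
    rw [hcast, hcast2, hamA_skip]
    exact hamA_main (interval.toNat - 1) (bs.drop (interval.toNat - 1)).length _ le_rfl 0
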